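-- pv_equiv track=rewrite | github.com/manuelescobar-dev/Computational-Intelligence | quixo/old/minimax_v5.py | hash_state
-- ===== SOURCE A (Python) =====
-- def hash_state(board):
--     index = 0
--     factor = 1
--
--     # Flatten the 5x5 board and convert to decimal
--     for row in board:
--         for cell in row:
--             if cell == 0:
--                 i = 1
--             elif cell == 1:
--                 i = 2
--             else:
--                 i = 0
--             index += factor * i
--             factor *= 3
--
--     return index
-- ===== SOURCE B (Python) =====
-- def hash_state(board):
--     # Horner's method over the flattened cells in reverse order:
--     # the running power-of-3 factor disappears into a multiply-accumulate.
--     index = 0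
--     for row in reversed(board):
--         for cell in reversed(row):
--             index = index * 3 + (1 if cell == 0 else 2 if cell == 1 else 0)
--     return index
-- ===== Notes on version B (the rewrite author's own statement) =====
-- stated objective: alternative
-- what changed: Replaces the running power-of-3 'factor' weight with Horner multiply-accumulate over the cells traversed in reverse order.
import Mathlib
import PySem

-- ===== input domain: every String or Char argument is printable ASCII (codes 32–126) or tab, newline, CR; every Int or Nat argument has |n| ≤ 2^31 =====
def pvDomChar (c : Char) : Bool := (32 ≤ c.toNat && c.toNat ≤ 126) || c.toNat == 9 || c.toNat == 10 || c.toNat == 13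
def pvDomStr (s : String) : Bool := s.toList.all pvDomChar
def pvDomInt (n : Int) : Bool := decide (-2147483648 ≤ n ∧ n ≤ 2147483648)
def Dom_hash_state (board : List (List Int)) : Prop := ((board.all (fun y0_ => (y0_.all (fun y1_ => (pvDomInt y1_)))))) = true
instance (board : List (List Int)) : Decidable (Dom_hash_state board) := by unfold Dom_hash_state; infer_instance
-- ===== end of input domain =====

-- B replaces A's running power-of-3 'factor' with Horner multiply-accumulate over the cells in reverse order (alternative decomposition, same cost).


-- ===== PORT A =====
-- state (index, factor); index += factor * i; factor *= 3
def hash_state (board : List (List Int)) : Int :=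
  (board.foldl (fun st row =>
    row.foldl (fun st cell =>
      let i : Int := if cell == 0 then 1 else if cell == 1 then 2 else 0
      (st.1 + st.2 * i, st.2 * 3)) st) ((0 : Int), (1 : Int))).1

-- ===== PORT B =====
-- Horner's method over the cells in reverse order: index = index*3 + digit
def hash_state_alt (board : List (List Int)) : Int :=
  board.reverse.foldl (fun idx row =>
    row.reverse.foldl (fun idx cell =>
      idx * 3 + (if cell == 0 then 1 else if cell == 1 then 2 else 0)) idx) 0

-- ===== PRECONDITION & SPEC =====
def Spec_hash_state (board : List (List Int)) (out : Int) : Prop := out = hash_state_alt board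
instance (board : List (List Int)) (out : Int) : Decidable (Spec_hash_state board out) := by unfold Spec_hash_state; infer_instance

-- ===== CLAIM (what is proved, stated in full; the proofs are below) =====
def Claim_equal_hash_state : Prop := ∀ (board : List (List Int)), Dom_hash_state board → Spec_hash_state board (hash_state board)

-- ===== LEMMAS AND PROOFS =====
def pvD (c : Int) : Int := if c == 0 then 1 else if c == 1 then 2 else 0
def pvG (c : Int) (a : Int) : Int := a * 3 + pvD c

theorem pv_shift (row : List Int) (acc : Int) :
    row.foldr pvG acc = acc * 3 ^ row.length + row.foldr pvG 0 := by
  induction row with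
  | nil => simp
  | cons c cs ih => simp [List.foldr, pvG, ih, pow_succ]; ring

theorem pv_innerB (row : List Int) (acc : Int) :
    row.reverse.foldl (fun idx cell =>
      idx * 3 + (if cell == 0 then 1 else if cell == 1 then 2 else (0 : Int))) acc
      = row.foldr pvG acc := by
  rw [List.foldl_reverse]
  rfl

theorem pv_altB (board : List (List Int)) (acc : Int) :
    board.reverse.foldl (fun idx row =>
      row.reverse.foldl (fun idx cell =>
        idx * 3 + (if cell == 0 then 1 else if cell == 1 then 2 else (0 : Int))) idx) acc
      = board.foldr (fun row a => row.foldr pvG a) acc := by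
  rw [List.foldl_reverse]
  congr 1
  funext row a
  exact pv_innerB row a

theorem pv_innerA (row : List Int) (i f : Int) :
    row.foldl (fun st cell =>
      let k : Int := if cell == 0 then 1 else if cell == 1 then 2 else 0
      (st.1 + st.2 * k, st.2 * 3)) (i, f)
      = (i + f * row.foldr pvG 0, f * 3 ^ row.length) := by
  induction row generalizing i f with
  | nil => simp
  | cons c cs ih =>
    simp only [List.foldl, List.foldr, ih]
    simp only [pvG, pvD, List.length_cons, pow_succ, Prod.mk.injEq]
    constructor <;> ring

theorem pv_outerA (board : List (List Int)) (i f : Int) :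
    (board.foldl (fun st row =>
      row.foldl (fun st cell =>
        let k : Int := if cell == 0 then 1 else if cell == 1 then 2 else 0
        (st.1 + st.2 * k, st.2 * 3)) st) (i, f)).1
      = i + f * board.foldr (fun row a => row.foldr pvG a) 0 := by
  induction board generalizing i f with
  | nil => simp
  | cons r rs ih =>
    simp only [List.foldl, List.foldr]
    rw [pv_innerA r i f, ih]
    rw [pv_shift r (rs.foldr (fun row a => row.foldr pvG a) 0)]
    ring

-- ===== VERDICT (by name: the statement is the Claim_ definition above) =====
theorem hash_state_spec : Claim_equal_hash_state := by
  intro board _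
  unfold Spec_hash_state hash_state hash_state_alt
  rw [pv_altB board 0, pv_outerA board 0 1]
  ring
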